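-- pv_equiv track=rewrite | github.com/Om-singhaI/NCAA | archive/ncaa_v25b_deepdive.py | nested_loso
-- ===== SOURCE A (Python) =====
-- def nested_loso(configs, test_seasons):
--     nested_total = 0
--     details = []
--     for hold in test_seasons:
--         tune = [s for s in test_seasons if s != hold]
--         best_tune = -1
--         best_idx = -1
--         for ci, (total, ps, name) in enumerate(configs):
--             tune_score = sum(ps.get(s, 0) for s in tune)
--             if tune_score > best_tune:
--                 best_tune = tune_score
--                 best_idx = ci
--             elif tune_score == best_tune and ci < best_idx:
--                 best_idx = ci
--         hold_exact = configs[best_idx][1].get(hold, 0)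
--         nested_total += hold_exact
--         details.append((hold, hold_exact, configs[best_idx][2]))
--     return nested_total, details
-- ===== SOURCE B (Python) =====
-- def nested_loso(configs, test_seasons):
--     # Stage 1 (once): season multiplicities and each config's score summed over ALL
--     # test seasons; a hold-out's tuning score is then full - cnt(hold)*ps.get(hold),
--     # a subtraction instead of an O(S) re-summation.
--     cnt = {}
--     for s in test_seasons:
--         cnt[s] = cnt.get(s, 0) + 1
--     pre = [(sum(ps.get(s, 0) for s in test_seasons), ps, name)
--            for _, ps, name in configs]
--
--     def pick(hold):
--         # running argmax by explicit index counter (ties keep the first maximum,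
--         # which is also what A's strict '>' selection yields)
--         k = cnt.get(hold, 0)
--         best, besti, i = -1, -1, 0
--         for full, ps, _ in pre:
--             sc = full - k * ps.get(hold, 0)
--             if sc > best:
--                 best, besti = sc, i
--             i += 1
--         return pre[besti]
--
--     # Stage 2: build the detail rows by mapping over the hold-outs, then total them.
--     details = []
--     for hold in test_seasons:
--         _, ps, name = pick(hold)
--         details.append((hold, ps.get(hold, 0), name))
--     return sum(h for _, h, _ in details), details
-- ===== Notes on version B (the rewrite author's own statement) =====
-- stated objective: faster
-- what changed: B precomputes each config's score over all test seasons once plus a season multiplicity counter, so each hold-out's tuning score is a single subtraction; selection is a recursive first-argmax helper instead of A's enumerate fold with a dead elif, and the total is summed from the detail rows after a map instead of being carried in the loop accumulator.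
import Mathlib
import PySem

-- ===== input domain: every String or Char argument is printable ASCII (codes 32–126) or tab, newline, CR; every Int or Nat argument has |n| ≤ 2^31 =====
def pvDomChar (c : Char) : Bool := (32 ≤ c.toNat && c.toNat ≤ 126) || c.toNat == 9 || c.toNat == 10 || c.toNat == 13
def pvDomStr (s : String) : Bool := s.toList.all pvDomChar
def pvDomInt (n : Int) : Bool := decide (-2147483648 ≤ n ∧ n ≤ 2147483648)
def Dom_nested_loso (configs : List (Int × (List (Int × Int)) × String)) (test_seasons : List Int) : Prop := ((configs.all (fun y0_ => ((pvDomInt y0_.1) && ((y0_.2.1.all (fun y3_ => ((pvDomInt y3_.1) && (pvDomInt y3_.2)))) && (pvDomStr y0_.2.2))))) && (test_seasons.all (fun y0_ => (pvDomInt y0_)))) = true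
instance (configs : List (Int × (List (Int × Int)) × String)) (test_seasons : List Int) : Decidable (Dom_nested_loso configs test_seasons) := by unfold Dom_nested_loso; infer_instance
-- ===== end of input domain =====

-- B precomputes each config's full-season sum once so a hold-out's tuning score is a
-- subtraction; selection is a recursive first-argmax and the total is summed from the rows.

-- ===== PORT A =====
-- ps.get(s, 0) on the association list standing for the Python dict (first match)
def dget (ps : List (Int × Int)) (s : Int) : Int := (PySem.Dict.mk ps).getD s 0

def nested_loso (configs : List (Int × (List (Int × Int)) × String)) (test_seasons : List Int) : Int × (List (Int × Int × String)) :=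
  test_seasons.foldl (fun acc hold =>
    let tune := test_seasons.filter (fun s => s ≠ hold)
    let sel := (PySem.List.enumerate configs).foldl (fun (bt : Int × Int) cip =>
        let tune_score := tune.foldl (fun a s => a + dget cip.2.2.1 s) 0
        if tune_score > bt.1 then (tune_score, cip.1)
        else if tune_score = bt.1 ∧ cip.1 < bt.2 then (bt.1, cip.1)
        else bt)
      (-1, -1)
    let best := (PySem.List.pyGet? configs sel.2).getD (0, [], "")
    let hold_exact := dget best.2.1 hold
    (acc.1 + hold_exact, acc.2 ++ [(hold, hold_exact, best.2.2)]))
  (0, [])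

-- ===== PORT B =====
-- running first-argmax over the precomputed rows, carrying an explicit index counter
def argmaxB (hold k : Int) : List (Int × (List (Int × Int)) × String) → Int → Int → Int → Int
  | [], _, _, besti => besti
  | c :: rest, i, best, besti =>
      let sc := c.1 - k * dget c.2.1 hold
      if sc > best then argmaxB hold k rest (i + 1) sc i
      else argmaxB hold k rest (i + 1) best besti

def pickB (cnt : PySem.Dict Int Int) (pre : List (Int × (List (Int × Int)) × String)) (hold : Int) : Int × (List (Int × Int)) × String :=
  (PySem.List.pyGet? pre (argmaxB hold (cnt.getD hold 0) pre 0 (-1) (-1))).getD (0, [], "")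

def nested_loso_alt (configs : List (Int × (List (Int × Int)) × String)) (test_seasons : List Int) : Int × (List (Int × Int × String)) :=
  let cnt : PySem.Dict Int Int := test_seasons.foldl (fun d s => d.insert s (d.getD s 0 + 1)) PySem.Dict.empty
  let pre := configs.map (fun c => (test_seasons.foldl (fun a s => a + dget c.2.1 s) 0, c.2.1, c.2.2))
  let details := test_seasons.map (fun hold =>
    let b := pickB cnt pre hold
    (hold, dget b.2.1 hold, b.2.2))
  (details.foldl (fun a d => a + d.2.1) 0, details)

-- ===== PRECONDITION & SPEC =====
-- Pre_ excludes exactly the inputs where Python A raises IndexError (configs empty with a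
-- nonempty test_seasons: configs[-1] on the empty list); B raises there too.
def Pre_nested_loso (configs : List (Int × (List (Int × Int)) × String)) (test_seasons : List Int) : Prop :=
  test_seasons = [] ∨ configs ≠ []
instance (configs : List (Int × (List (Int × Int)) × String)) (test_seasons : List Int) : Decidable (Pre_nested_loso configs test_seasons) := by unfold Pre_nested_loso; infer_instance
def pvWitness_nested_loso : (List (Int × (List (Int × Int)) × String)) × List Int :=
  ([(0, [(1, 2), (2, 3)], "a"), (0, [(1, 5)], "b")], [1, 2])

def Spec_nested_loso (configs : List (Int × (List (Int × Int)) × String)) (test_seasons : List Int) (out : Int × (List (Int × Int × String))) : Prop := out = nested_loso_alt configs test_seasons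
instance (configs : List (Int × (List (Int × Int)) × String)) (test_seasons : List Int) (out : Int × (List (Int × Int × String))) : Decidable (Spec_nested_loso configs test_seasons out) := by unfold Spec_nested_loso; infer_instance

-- ===== CLAIM (what is proved, stated in full; the proofs are below) =====
def Claim_equal_nested_loso : Prop := ∀ (configs : List (Int × (List (Int × Int)) × String)) (test_seasons : List Int), Dom_nested_loso configs test_seasons → Pre_nested_loso configs test_seasons → Spec_nested_loso configs test_seasons (nested_loso configs test_seasons)

-- ===== LEMMAS AND PROOFS =====

-- A's per-hold row, as a function (definitionally A's loop body produces it)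
def gA (configs : List (Int × (List (Int × Int)) × String)) (test_seasons : List Int) (hold : Int) : Int × Int × String :=
  let tune := test_seasons.filter (fun s => s ≠ hold)
  let sel := (PySem.List.enumerate configs).foldl (fun (bt : Int × Int) cip =>
      let tune_score := tune.foldl (fun a s => a + dget cip.2.2.1 s) 0
      if tune_score > bt.1 then (tune_score, cip.1)
      else if tune_score = bt.1 ∧ cip.1 < bt.2 then (bt.1, cip.1)
      else bt)
    (-1, -1)
  let best := (PySem.List.pyGet? configs sel.2).getD (0, [], "")
  (hold, dget best.2.1 hold, best.2.2)

-- B's per-hold row, as a function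
def gB (configs : List (Int × (List (Int × Int)) × String)) (test_seasons : List Int) (hold : Int) : Int × Int × String :=
  let cnt : PySem.Dict Int Int := test_seasons.foldl (fun d s => d.insert s (d.getD s 0 + 1)) PySem.Dict.empty
  let pre := configs.map (fun c => (test_seasons.foldl (fun a s => a + dget c.2.1 s) 0, c.2.1, c.2.2))
  let b := pickB cnt pre hold
  (hold, dget b.2.1 hold, b.2.2)

-- additive fold commutes with a shifted initial accumulator
theorem foldl_add_init {α : Type} (f : α → Int) : ∀ (ts : List α) (a c : Int),
    ts.foldl (fun a s => a + f s) (a + c) = ts.foldl (fun a s => a + f s) a + c := by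
  intro ts
  induction ts with
  | nil => intro a c; simp
  | cons t ts ih =>
    intro a c
    simp only [List.foldl_cons]
    rw [show a + c + f t = (a + f t) + c by ring, ih]

-- A's accumulator fold splits into (sum of the rows, the list of rows)
theorem fold_split (g : Int → Int × Int × String) : ∀ (ts : List Int) (t : Int) (d : List (Int × Int × String)),
    ts.foldl (fun acc hold => (acc.1 + (g hold).2.1, acc.2 ++ [g hold])) (t, d)
      = (t + (ts.map g).foldl (fun a x => a + x.2.1) 0, d ++ ts.map g) := by
  intro ts
  induction ts with
  | nil => intro t d; simp
  | cons x ts ih =>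
    intro t d
    simp only [List.foldl_cons, List.map_cons]
    rw [ih, foldl_add_init (fun x : Int × Int × String => x.2.1) (ts.map g) 0 ((g x).2.1)]
    refine Prod.ext ?_ ?_
    · show t + (g x).2.1 + _ = t + (_ + (g x).2.1); ring
    · simp

-- summing over the filtered list = full sum minus multiplicity * value
theorem filter_sum_eq (f : Int → Int) (h : Int) : ∀ (ts : List Int) (a : Int),
    (ts.filter (fun s => s ≠ h)).foldl (fun a s => a + f s) a
      = ts.foldl (fun a s => a + f s) a - (ts.count h : Int) * f h := by
  intro ts
  induction ts with
  | nil => intro a; simp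
  | cons t ts ih =>
    intro a
    by_cases ht : t = h
    · subst ht
      have hf : (t :: ts).filter (fun s => s ≠ t) = ts.filter (fun s => s ≠ t) := by
        simp
      rw [hf, ih, List.foldl_cons, foldl_add_init f ts a (f t), List.count_cons_self]
      push_cast; ring
    · have hf : (t :: ts).filter (fun s => s ≠ h) = t :: ts.filter (fun s => s ≠ h) := by
        simp [ht]
      have hc : (t :: ts).count h = ts.count h := by
        simp [ht]
      rw [hf, List.foldl_cons, ih (a + f t), List.foldl_cons, hc]

-- the counter built by insert/getD equals list multiplicity
theorem cnt_getD : ∀ (ts : List Int) (d : PySem.Dict Int Int) (x : Int),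
    (ts.foldl (fun d s => d.insert s (d.getD s 0 + 1)) d).getD x 0
      = d.getD x 0 + (ts.count x : Int) := by
  intro ts
  induction ts with
  | nil => intro d x; simp
  | cons t ts ih =>
    intro d x
    simp only [List.foldl_cons]
    rw [ih, PySem.Dict.getD_insert]
    by_cases hx : x = t
    · subst hx
      rw [if_pos rfl, List.count_cons_self]
      push_cast; ring
    · have hc : (t :: ts).count x = ts.count x := by
        simp [Ne.symm hx]
      rw [if_neg hx, hc]

-- enumerate commutes with map
theorem enumerate_map {α β : Type} (m : α → β) : ∀ (l : List α) (s : Int),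
    PySem.List.enumerate (l.map m) s = (PySem.List.enumerate l s).map (fun p => (p.1, m p.2)) := by
  intro l
  induction l with
  | nil => intro s; simp [PySem.List.enumerate_nil]
  | cons x l ih => intro s; simp [PySem.List.enumerate_cons, ih]

-- pyGet? commutes with map
theorem pyGet?_map {α β : Type} (m : α → β) (l : List α) (i : Int) :
    PySem.List.pyGet? (l.map m) i = (PySem.List.pyGet? l i).map m := by
  simp only [PySem.List.pyGet?, PySem.List.pyIdx?, List.length_map]
  split <;> simp

-- A's selection fold (with its dead elif) equals a simple strict-argmax fold, when the
-- per-element scores agree and the indices are strictly increasing above bt.2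
theorem sel_fold_eq {α : Type} (sA sB : α → Int) :
    ∀ (l : List (Int × α)) (bt : Int × Int),
    (∀ p ∈ l, sA p.2 = sB p.2) →
    (∀ p ∈ l, bt.2 < p.1) →
    l.Pairwise (fun p q => p.1 < q.1) →
    l.foldl (fun (bt : Int × Int) cip =>
        let ts := sA cip.2
        if ts > bt.1 then (ts, cip.1)
        else if ts = bt.1 ∧ cip.1 < bt.2 then (bt.1, cip.1)
        else bt) bt
      = l.foldl (fun (bt : Int × Int) cip =>
        let ts := sB cip.2
        if ts > bt.1 then (ts, cip.1) else bt) bt := by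
  intro l
  induction l with
  | nil => intro bt _ _ _; rfl
  | cons p l ih =>
    intro bt hs hlt hpw
    have hsp : sA p.2 = sB p.2 := hs p (List.mem_cons_self ..)
    have hbt : bt.2 < p.1 := hlt p (List.mem_cons_self ..)
    have hpw' := (List.pairwise_cons.mp hpw)
    simp only [List.foldl_cons]
    rw [hsp]
    by_cases hgt : sB p.2 > bt.1
    · rw [if_pos hgt, if_pos hgt]
      exact ih (sB p.2, p.1) (fun q hq => hs q (List.mem_cons_of_mem _ hq))
        (fun q hq => hpw'.1 q hq) hpw'.2
    · rw [if_neg hgt, if_neg hgt]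
      rw [if_neg (by rintro ⟨_, hlt'⟩; omega)]
      exact ih bt (fun q hq => hs q (List.mem_cons_of_mem _ hq))
        (fun q hq => lt_trans hbt (hpw'.1 q hq)) hpw'.2

-- B's recursive first-argmax equals the simple strict-argmax fold over enumerate
theorem argmaxB_eq (hold k : Int) : ∀ (l : List (Int × (List (Int × Int)) × String)) (i best besti : Int),
    argmaxB hold k l i best besti
      = ((PySem.List.enumerate l i).foldl (fun (bt : Int × Int) cip =>
          let sc := cip.2.1 - k * dget cip.2.2.1 hold
          if sc > bt.1 then (sc, cip.1) else bt) (best, besti)).2 := by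
  intro l
  induction l with
  | nil => intro i best besti; simp [argmaxB, PySem.List.enumerate_nil]
  | cons c rest ih =>
    intro i best besti
    simp only [argmaxB, PySem.List.enumerate_cons, List.foldl_cons]
    by_cases h : c.1 - k * dget c.2.1 hold > best
    · rw [if_pos h, if_pos h, ih]
    · rw [if_neg h, if_neg h, ih]

-- the per-hold rows coincide
theorem gA_eq_gB (configs : List (Int × (List (Int × Int)) × String)) (test_seasons : List Int) (hold : Int) :
    gA configs test_seasons hold = gB configs test_seasons hold := by
  simp only [gA, gB, pickB]
  have hk : ((test_seasons.foldl (fun d s => d.insert s (d.getD s 0 + 1))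
      (PySem.Dict.empty : PySem.Dict Int Int)).getD hold 0) = (test_seasons.count hold : Int) := by
    rw [cnt_getD]; simp
  rw [hk, argmaxB_eq, enumerate_map, List.foldl_map]
  have hsel := sel_fold_eq
    (fun c : Int × (List (Int × Int)) × String =>
      (test_seasons.filter (fun s => s ≠ hold)).foldl (fun a s => a + dget c.2.1 s) 0)
    (fun c : Int × (List (Int × Int)) × String =>
      test_seasons.foldl (fun a s => a + dget c.2.1 s) 0 - (test_seasons.count hold : Int) * dget c.2.1 hold)
    (PySem.List.enumerate configs) (-1, -1)
    (fun p _ => filter_sum_eq (dget p.2.2.1) hold test_seasons 0)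
    (fun p hp => by
      rcases (PySem.List.mem_enumerate_iff _ _ _).mp hp with ⟨k, hkl, rfl⟩
      show (-1 : Int) < 0 + (k : Int); omega)
    (PySem.List.pairwise_lt_enumerate configs 0)
  rw [hsel]
  rw [pyGet?_map (fun c : Int × (List (Int × Int)) × String =>
      (test_seasons.foldl (fun a s => a + dget c.2.1 s) 0, c.2.1, c.2.2)) configs]
  cases PySem.List.pyGet? configs
      ((((PySem.List.enumerate configs).foldl (fun bt cip =>
        if test_seasons.foldl (fun a s => a + dget cip.2.2.1 s) 0 - (test_seasons.count hold : Int) * dget cip.2.2.1 hold > bt.1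
        then (test_seasons.foldl (fun a s => a + dget cip.2.2.1 s) 0 - (test_seasons.count hold : Int) * dget cip.2.2.1 hold, cip.1)
        else bt) ((-1 : Int), (-1 : Int))).2)) with
  | none => rfl
  | some c => rfl

theorem nested_loso_eq (configs : List (Int × (List (Int × Int)) × String)) (test_seasons : List Int) :
    nested_loso configs test_seasons = nested_loso_alt configs test_seasons := by
  have hA : nested_loso configs test_seasons
      = test_seasons.foldl (fun acc hold =>
          (acc.1 + (gA configs test_seasons hold).2.1, acc.2 ++ [gA configs test_seasons hold])) (0, []) := rfl
  have hB : nested_loso_alt configs test_seasons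
      = ((test_seasons.map (gB configs test_seasons)).foldl (fun a x => a + x.2.1) 0,
         test_seasons.map (gB configs test_seasons)) := rfl
  rw [hA, hB, fold_split]
  have hmap : test_seasons.map (gA configs test_seasons) = test_seasons.map (gB configs test_seasons) :=
    List.map_congr_left (fun hold _ => gA_eq_gB configs test_seasons hold)
  rw [hmap]
  simp

-- ===== VERDICT (by name: the statement is the Claim_ definition above) =====
theorem nested_loso_spec : Claim_equal_nested_loso := by
  intro configs test_seasons _ _
  show nested_loso configs test_seasons = nested_loso_alt configs test_seasons
  exact nested_loso_eq configs test_seasons
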